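-- pv_equiv track=rewrite | github.com/xslower/python | quant/bak/three/main.py | getMaxBeforeMin
-- ===== SOURCE A (Python) =====
-- def getMaxBeforeMin(val_list):
--     mx = 0
--     max_idx = 0
--     for i in range(0, len(val_list)):
--         if val_list[i] > mx:
--             mx = val_list[i]
--             max_idx = i
--     mn = mx
--     min_idx = max_idx
--     for i in range(max_idx, len(val_list)):
--         if val_list[i] < mn:
--             mn = val_list[i]
--             min_idx = i
--     return [min_idx, mn, max_idx, mx]
-- ===== SOURCE B (Python) =====
-- def getMaxBeforeMin(val_list):
--     mx = 0
--     max_idx = 0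
--     mn = 0
--     min_idx = 0
--     for i, val in enumerate(val_list):
--         if val > mx:
--             mx = val
--             max_idx = i
--             mn = val
--             min_idx = i
--         elif val < mn:
--             mn = val
--             min_idx = i
--     return [min_idx, mn, max_idx, mx]
-- ===== Notes on version B (the rewrite author's own statement) =====
-- stated objective: alternative
-- what changed: Replaces A's two passes (find the max, then rescan from the max index for the min) by a single enumerate loop that resets the running min whenever a new strict max appears.
import Mathlib
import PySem

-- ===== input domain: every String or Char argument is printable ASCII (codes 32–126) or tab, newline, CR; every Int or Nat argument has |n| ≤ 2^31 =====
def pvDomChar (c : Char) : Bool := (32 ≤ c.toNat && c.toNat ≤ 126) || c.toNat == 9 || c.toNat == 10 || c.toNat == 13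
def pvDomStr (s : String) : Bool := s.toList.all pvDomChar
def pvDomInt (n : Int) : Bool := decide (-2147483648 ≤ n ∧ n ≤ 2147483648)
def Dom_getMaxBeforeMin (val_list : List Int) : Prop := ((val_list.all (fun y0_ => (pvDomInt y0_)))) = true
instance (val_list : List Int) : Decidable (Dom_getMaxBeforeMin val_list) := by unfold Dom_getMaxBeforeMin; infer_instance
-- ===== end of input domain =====

-- B is a single pass over enumerate(val_list) that resets the running min whenever a new strict
-- max appears, instead of A's two passes (max pass, then a rescan from the max index for the min).

-- ===== PORT A =====
-- body of A's first loop: 'if val_list[i] > mx: mx, max_idx = val_list[i], i'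
def stepMaxA (val_list : List Int) (s : Int × Int) (i : Int) : Int × Int :=
  if PySem.List.pyGetD val_list i 0 > s.1 then (PySem.List.pyGetD val_list i 0, i) else s

-- body of A's second loop: 'if val_list[i] < mn: mn, min_idx = val_list[i], i'
def stepMinA (val_list : List Int) (s : Int × Int) (i : Int) : Int × Int :=
  if PySem.List.pyGetD val_list i 0 < s.1 then (PySem.List.pyGetD val_list i 0, i) else s

def getMaxBeforeMin (val_list : List Int) : List Int :=
  let s1 := (PySem.List.pyRange 0 (val_list.length : Int) 1).foldl (stepMaxA val_list) (0, 0)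
  let s2 := (PySem.List.pyRange s1.2 (val_list.length : Int) 1).foldl (stepMinA val_list) s1
  [s2.2, s2.1, s1.2, s1.1]

-- ===== PORT B =====
-- body of B's single loop: state = ((mx, max_idx), (mn, min_idx)), input = (i, val)
def stepB (s : (Int × Int) × (Int × Int)) (p : Int × Int) : (Int × Int) × (Int × Int) :=
  if p.2 > s.1.1 then ((p.2, p.1), (p.2, p.1))
  else if p.2 < s.2.1 then (s.1, (p.2, p.1))
  else s

def getMaxBeforeMin_alt (val_list : List Int) : List Int :=
  let s := (PySem.List.enumerate val_list 0).foldl stepB ((0, 0), (0, 0))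
  [s.2.2, s.2.1, s.1.2, s.1.1]

-- ===== PRECONDITION & SPEC =====
def Spec_getMaxBeforeMin (val_list : List Int) (out : List Int) : Prop := out = getMaxBeforeMin_alt val_list
instance (val_list : List Int) (out : List Int) : Decidable (Spec_getMaxBeforeMin val_list out) := by unfold Spec_getMaxBeforeMin; infer_instance

-- ===== CLAIM (what is proved, stated in full; the proofs are below) =====
def Claim_equal_getMaxBeforeMin : Prop := ∀ (val_list : List Int), Dom_getMaxBeforeMin val_list → Spec_getMaxBeforeMin val_list (getMaxBeforeMin val_list)

-- ===== LEMMAS AND PROOFS =====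

-- pyGetD on an appended list agrees with pyGetD on the prefix inside the prefix's range
theorem pyGetD_append_left (l : List Int) (v : Int) (i : Int)
    (h0 : 0 ≤ i) (h1 : i < (l.length : Int)) :
    PySem.List.pyGetD (l ++ [v]) i 0 = PySem.List.pyGetD l i 0 := by
  rw [PySem.List.pyGetD_eq_getElem (l ++ [v]) 0 h0 (by simp; omega),
      PySem.List.pyGetD_eq_getElem l 0 h0 h1]
  exact List.getElem_append_left (by omega)

theorem pyGetD_append_last (l : List Int) (v : Int) :
    PySem.List.pyGetD (l ++ [v]) (l.length : Int) 0 = v := by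
  rw [PySem.List.pyGetD_eq_getElem (l ++ [v]) 0 (by positivity) (by simp)]
  simp

-- the main invariant: B's single-pass state is exactly (A's first-pass state, A's second-pass state)
theorem main_inv (l : List Int) :
    (0 ≤ ((PySem.List.pyRange 0 (l.length : Int) 1).foldl (stepMaxA l) (0, 0)).2 ∧
     ((PySem.List.pyRange 0 (l.length : Int) 1).foldl (stepMaxA l) (0, 0)).2 ≤ (l.length : Int)) ∧
    (PySem.List.enumerate l 0).foldl stepB ((0, 0), (0, 0)) =
      ((PySem.List.pyRange 0 (l.length : Int) 1).foldl (stepMaxA l) (0, 0),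
       (PySem.List.pyRange ((PySem.List.pyRange 0 (l.length : Int) 1).foldl (stepMaxA l) (0, 0)).2
          (l.length : Int) 1).foldl (stepMinA l)
         ((PySem.List.pyRange 0 (l.length : Int) 1).foldl (stepMaxA l) (0, 0))) := by
  induction l using List.reverseRecOn with
  | nil => simp [PySem.List.pyRange_one_eq_nil, PySem.List.enumerate]
  | append_singleton l v ih =>
    obtain ⟨⟨hmi0, hmin⟩, hB⟩ := ih
    set n : Int := (l.length : Int) with hn
    -- the prefix folds over l ++ [v] coincide with the folds over l
    have hcongr1 : ∀ (s : Int × Int),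
        (PySem.List.pyRange 0 n 1).foldl (stepMaxA (l ++ [v])) s =
        (PySem.List.pyRange 0 n 1).foldl (stepMaxA l) s := by
      intro s
      apply PySem.List.foldl_congr_mem
      intro a x hx
      have := (PySem.List.mem_pyRange_one).1 hx
      simp [stepMaxA, pyGetD_append_left l v x this.1 this.2]
    have hcongr2 : ∀ (a b : Int) (s : Int × Int), 0 ≤ a →
        (PySem.List.pyRange a n 1).foldl (stepMinA (l ++ [v])) s =
        (PySem.List.pyRange a n 1).foldl (stepMinA l) s := by
      intro a b s ha
      apply PySem.List.foldl_congr_mem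
      intro c x hx
      have := (PySem.List.mem_pyRange_one).1 hx
      simp [stepMinA, pyGetD_append_left l v x (le_trans ha this.1) this.2]
    have hlen : ((l ++ [v]).length : Int) = n + 1 := by simp [hn]
    have hr1 : PySem.List.pyRange 0 (n + 1) 1 = PySem.List.pyRange 0 n 1 ++ [n] := by
      exact PySem.List.pyRange_one_succ_right (by positivity)
    set s1 : Int × Int := (PySem.List.pyRange 0 n 1).foldl (stepMaxA l) (0, 0) with hs1
    have hA1 : (PySem.List.pyRange 0 ((l ++ [v]).length : Int) 1).foldl (stepMaxA (l ++ [v])) (0, 0)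
        = stepMaxA (l ++ [v]) s1 n := by
      rw [hlen, hr1, List.foldl_append, hcongr1]
      simp [← hs1]
    have henum : PySem.List.enumerate (l ++ [v]) 0 = PySem.List.enumerate l 0 ++ [(n, v)] := by
      rw [PySem.List.enumerate_append]
      simp [PySem.List.enumerate, hn]
    have hstep : stepMaxA (l ++ [v]) s1 n =
        if v > s1.1 then (v, n) else s1 := by
      simp [stepMaxA, pyGetD_append_last l v, hn]
    by_cases hv : v > s1.1
    · -- new strict max at index n: both sides reset to ((v,n),(v,n))
      rw [hA1, hstep, if_pos hv]
      refine ⟨⟨by omega, by omega⟩, ?_⟩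
      rw [henum, List.foldl_append, hB]
      have h2 : (PySem.List.pyRange n (n + 1) 1).foldl (stepMinA (l ++ [v])) (v, n) = (v, n) := by
        rw [PySem.List.pyRange_one_singleton]
        simp [stepMinA, pyGetD_append_last l v, hn]
      rw [hlen, h2]
      simp [stepB, hv]
    · -- no new max: the second-pass fold gains exactly one step at index n
      rw [hA1, hstep, if_neg hv]
      refine ⟨⟨hmi0, by omega⟩, ?_⟩
      rw [henum, List.foldl_append, hB]
      have hr2 : PySem.List.pyRange s1.2 (n + 1) 1 = PySem.List.pyRange s1.2 n 1 ++ [n] :=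
        PySem.List.pyRange_one_succ_right hmin
      rw [hlen, hr2, List.foldl_append, hcongr2 s1.2 n s1 hmi0]
      set s2 : Int × Int := (PySem.List.pyRange s1.2 n 1).foldl (stepMinA l) s1 with hs2
      have hstep2 : stepMinA (l ++ [v]) s2 n = if v < s2.1 then (v, n) else s2 := by
        simp [stepMinA, pyGetD_append_last l v, hn]
      simp only [List.foldl, hstep2]
      simp only [stepB, hn]
      rw [if_neg (by simpa using hv)]
      by_cases hv2 : v < s2.1
      · rw [if_pos hv2, if_pos (by simpa using hv2)]
      · rw [if_neg hv2, if_neg (by simpa using hv2)]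

-- ===== VERDICT (by name: the statement is the Claim_ definition above) =====
theorem getMaxBeforeMin_spec : Claim_equal_getMaxBeforeMin := by
  intro val_list _
  unfold Spec_getMaxBeforeMin getMaxBeforeMin getMaxBeforeMin_alt
  have h := (main_inv val_list).2
  simp only [h]
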